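-- pv_equiv track=rewrite | github.com/chenjienan/python-leetcode | OA/LintCode.1639.K-Substring-with-K different-chars.py | KSubstring
-- ===== SOURCE A (Python) =====
-- def KSubstring(stringIn, K):
--     # Write your code here
--     if len(stringIn) < K: return 0
--
--     dist_substring = set()
--     window = ''
--
--     for c in stringIn:
--         if c in window:
--             window = window[window.index(c) + 1:]
--
--         window += c
--
--         if len(window) == K:
--             dist_substring.add(window)
--             window = window[1:]
--
--     return len(dist_substring)
-- ===== SOURCE B (Python) =====
-- def KSubstring(stringIn, K):
--     # Enumerate each length-K window by index; a window counts when its K chars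
--     # are pairwise distinct.  (K <= 0 can never yield a K-char window.)
--     if K <= 0 or len(stringIn) < K:
--         return 0
--     found = set()
--     for i in range(len(stringIn) - K + 1):
--         sub = stringIn[i:i + K]
--         if len(set(sub)) == K:
--             found.add(sub)
--     return len(found)
-- ===== Notes on version B (the rewrite author's own statement) =====
-- stated objective: simpler
-- what changed: Replaces the incremental deduplicated sliding window (trim on repeat, emit and shift) by direct index enumeration: each length-K slice is tested independently with len(set(sub)) == K and collected into a set.
import Mathlib
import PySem

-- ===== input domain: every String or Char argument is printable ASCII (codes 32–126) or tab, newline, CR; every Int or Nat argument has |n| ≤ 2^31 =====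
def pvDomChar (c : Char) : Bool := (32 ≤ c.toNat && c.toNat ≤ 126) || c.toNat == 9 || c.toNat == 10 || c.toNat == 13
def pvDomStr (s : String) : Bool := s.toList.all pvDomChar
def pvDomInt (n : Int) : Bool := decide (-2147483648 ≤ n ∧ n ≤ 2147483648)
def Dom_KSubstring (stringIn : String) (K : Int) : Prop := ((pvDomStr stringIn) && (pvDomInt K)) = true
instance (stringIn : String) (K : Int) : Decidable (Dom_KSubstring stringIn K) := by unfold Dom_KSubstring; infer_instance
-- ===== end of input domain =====

-- B replaces A's incremental deduplicated sliding window by independent index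
-- enumeration of every length-K slice (objective: simpler; same return value on all inputs).

-- ===== PORT A =====
-- Python A's loop body: trim the window past a repeated char, append c, and when
-- the window reaches length K record it and drop its first char.
def pvStepA (K : Int) (acc : PySem.Set (List Char) × List Char) (c : Char) :
    PySem.Set (List Char) × List Char :=
  let w0 := if acc.2.contains c then acc.2.drop (acc.2.idxOf c + 1) else acc.2
  let w1 := w0 ++ [c]
  if (w1.length : Int) = K then (PySem.Set.add acc.1 w1, w1.drop 1) else (acc.1, w1)

def KSubstring (stringIn : String) (K : Int) : Int :=
  if PySem.Str.len stringIn < K then 0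
  else
    let res := stringIn.toList.foldl (pvStepA K) (PySem.Set.empty, [])
    ((res.1.length : Int))

-- ===== PORT B =====
def KSubstring_alt (stringIn : String) (K : Int) : Int :=
  if K ≤ 0 ∨ PySem.Str.len stringIn < K then 0
  else
    let l := stringIn.toList
    let found := (PySem.List.pyRange 0 (PySem.Str.len stringIn - K + 1) 1).foldl
      (fun (found : PySem.Set (List Char)) i =>
        let sub := PySem.List.slice l (some i) (some (i + K))
        if ((PySem.Set.ofList sub).length : Int) = K then PySem.Set.add found sub
        else found)
      PySem.Set.empty
    ((found.length : Int))

-- ===== PRECONDITION & SPEC =====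
def Spec_KSubstring (stringIn : String) (K : Int) (out : Int) : Prop := out = KSubstring_alt stringIn K
instance (stringIn : String) (K : Int) (out : Int) : Decidable (Spec_KSubstring stringIn K out) := by unfold Spec_KSubstring; infer_instance

-- ===== CLAIM (what is proved, stated in full; the proofs are below) =====
def Claim_equal_KSubstring : Prop := ∀ (stringIn : String) (K : Int), Dom_KSubstring stringIn K → Spec_KSubstring stringIn K (KSubstring stringIn K)

-- ===== LEMMAS AND PROOFS =====

theorem pv_suffix_total {α : Type} {u v l : List α} (hu : u <:+ l) (hv : v <:+ l)
    (h : u.length ≤ v.length) : u <:+ v := by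
  obtain ⟨p, rfl⟩ := hu
  obtain ⟨q, hq⟩ := hv
  have hlen : q.length ≤ p.length := by
    have := congrArg List.length hq
    simp at this; omega
  have h1 : u = (p ++ u).drop p.length := by simp
  have h2 : v = (p ++ u).drop q.length := by
    rw [← hq]; simp
  rw [h1, h2]
  have h3 : p.length = (p.length - q.length) + q.length := by omega
  rw [h3, Nat.add_comm, ← List.drop_drop]
  exact List.drop_suffix _ _

theorem pv_suffix_snoc {α : Type} {u v : List α} (c : α) (h : u <:+ v) :
    u ++ [c] <:+ v ++ [c] := by
  obtain ⟨p, rfl⟩ := h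
  exact ⟨p, by simp⟩

theorem pv_suffix_snoc_cases {α : Type} {u l : List α} {c : α} (h : u <:+ l ++ [c]) :
    u = [] ∨ ∃ u', u = u' ++ [c] ∧ u' <:+ l := by
  obtain ⟨p, hp⟩ := h
  cases u using List.reverseRecOn with
  | nil => exact Or.inl rfl
  | append_singleton u' d =>
    right
    have hd : d = c := by simpa using congrArg List.getLast? hp
    refine ⟨u', by rw [hd], ⟨p, ?_⟩⟩
    have h2 : (p ++ u') ++ [d] = l ++ [c] := by simpa using hp
    rw [hd] at h2
    exact List.append_cancel_right h2

theorem pv_suffix_eq_drop {α : Type} {u l : List α} (h : u <:+ l) :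
    u = l.drop (l.length - u.length) := by
  obtain ⟨p, rfl⟩ := h
  simp

def pvInv (k : ℕ) (pre w : List Char) : Prop :=
  w <:+ pre ∧ w.Nodup ∧ w.length < k ∧
    ∀ u : List Char, u <:+ pre → u.Nodup → u.length < k → u.length ≤ w.length

theorem pv_w1 (k : ℕ) (pre w : List Char) (c : Char) (hInv : pvInv k pre w) :
    ((if w.contains c then w.drop (w.idxOf c + 1) else w) ++ [c]) <:+ pre ++ [c] ∧
    ((if w.contains c then w.drop (w.idxOf c + 1) else w) ++ [c]).Nodup ∧
    ((if w.contains c then w.drop (w.idxOf c + 1) else w) ++ [c]).length ≤ k ∧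
      ∀ u, u <:+ pre ++ [c] → u.Nodup → u.length ≤ k →
        u <:+ ((if w.contains c then w.drop (w.idxOf c + 1) else w) ++ [c]) := by
  obtain ⟨hsuf, hnd, hlenw, hmax⟩ := hInv
  set w0 := if w.contains c then w.drop (w.idxOf c + 1) else w with hw0
  have hw0suf : w0 <:+ w := by
    rw [hw0]; split
    · exact List.drop_suffix _ _
    · exact List.suffix_refl w
  have hw0nd : w0.Nodup := hw0suf.sublist.nodup hnd
  have hw0len : w0.length + 1 ≤ k := by
    rcases hw0suf with ⟨p, hp⟩
    have := congrArg List.length hp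
    simp at this
    by_cases hc : c ∈ w
    · have hcc : w.contains c = true := by simpa using hc
      rw [hw0] at *
      simp [hcc] at *
      have hi : w.idxOf c < w.length := List.idxOf_lt_length_of_mem hc
      omega
    · have hcc : ¬ (w.contains c = true) := by simpa using hc
      rw [hw0] at *
      simp [hcc] at *
      omega
  have hw0notc : c ∉ w0 := by
    by_cases hc : c ∈ w
    · have hcc : w.contains c = true := by simpa using hc
      rw [hw0, if_pos hcc]
      intro hmem
      obtain ⟨j, hj, hjc⟩ := List.getElem_of_mem hmem
      have hi : w.idxOf c < w.length := List.idxOf_lt_length_of_mem hc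
      have hwi : w[w.idxOf c] = c := List.getElem_idxOf hi
      simp only [List.length_drop] at hj
      have hlt : w.idxOf c + 1 + j < w.length := by omega
      rw [List.getElem_drop] at hjc
      have heq : w[w.idxOf c]'hi = w[w.idxOf c + 1 + j]'hlt := by rw [hwi, hjc]
      have := (List.Nodup.getElem_inj_iff hnd).mp heq
      omega
    · have hcc : ¬ (w.contains c = true) := by simpa using hc
      rw [hw0, if_neg hcc]; exact hc
  have hw0max : ∀ u', u' <:+ w → c ∉ u' → u' <:+ w0 := by
    intro u' hu' hcu'
    by_cases hc : c ∈ w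
    · have hcc : w.contains c = true := by simpa using hc
      have hi : w.idxOf c < w.length := List.idxOf_lt_length_of_mem hc
      have hwi : w[w.idxOf c] = c := List.getElem_idxOf hi
      have hlenu : u'.length ≤ w0.length := by
        by_contra hgt
        push_neg at hgt
        have hw0l : w0.length = w.length - (w.idxOf c + 1) := by
          rw [hw0, if_pos hcc]; simp
        have hm : w.length - u'.length ≤ w.idxOf c := by omega
        have hud : u' = w.drop (w.length - u'.length) := pv_suffix_eq_drop hu'
        have hul : u'.length ≤ w.length := hu'.length_le
        have : c ∈ u' := by
          rw [hud]
          have hlt : w.idxOf c - (w.length - u'.length) < (w.drop (w.length - u'.length)).length := by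
            simp; omega
          have : (w.drop (w.length - u'.length))[w.idxOf c - (w.length - u'.length)] = c := by
            rw [List.getElem_drop]
            have : w.length - u'.length + (w.idxOf c - (w.length - u'.length)) = w.idxOf c := by omega
            simp_rw [this]; exact hwi
          exact this ▸ List.getElem_mem hlt
        exact hcu' this
      exact pv_suffix_total hu' hw0suf hlenu
    · have hcc : ¬ (w.contains c = true) := by simpa using hc
      rw [hw0, if_neg hcc]; exact hu'
  refine ⟨pv_suffix_snoc c (hw0suf.trans hsuf), ?_, by simpa using hw0len, ?_⟩
  · simp [List.nodup_append]
    exact ⟨hw0nd, fun a ha hac => hw0notc (hac ▸ ha)⟩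
  · intro u hu hund hulen
    rcases pv_suffix_snoc_cases hu with rfl | ⟨u', rfl, hu'⟩
    · exact List.nil_suffix
    · have hnd' : u'.Nodup ∧ c ∉ u' := by
        rw [List.nodup_append] at hund
        refine ⟨hund.1, fun h => ?_⟩
        exact hund.2.2 c h c (by simp) rfl
      have hlen' : u'.length < k := by
        simp at hulen; omega
      have h1 : u'.length ≤ w.length := hmax u' hu' hnd'.1 hlen'
      have h2 : u' <:+ w := pv_suffix_total hu' hsuf h1
      exact pv_suffix_snoc c (hw0max u' h2 hnd'.2)


def pvLastK (k : ℕ) (l : List Char) : List Char := l.drop (l.length - k)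

theorem pv_lastK_len (k : ℕ) (l : List Char) (hkl : k ≤ l.length) :
    (pvLastK k l).length = k := by simp [pvLastK]; omega

theorem pv_lastK_suffix (k : ℕ) (l : List Char) : pvLastK k l <:+ l :=
  List.drop_suffix _ _

theorem pv_step (K : Int) (k : ℕ) (hk : (k : Int) = K) (hk1 : 1 ≤ k)
    (pre w : List Char) (c : Char) (hInv : pvInv k pre w) (s : PySem.Set (List Char)) :
    (pvStepA K (s, w) c).1 =
      (if k ≤ (pre ++ [c]).length ∧ (pvLastK k (pre ++ [c])).Nodup
        then PySem.Set.add s (pvLastK k (pre ++ [c])) else s) ∧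
    pvInv k (pre ++ [c]) (pvStepA K (s, w) c).2 := by
  obtain ⟨hs1, hn1, hl1, hm1⟩ := pv_w1 k pre w c hInv
  set w1 := (if w.contains c then w.drop (w.idxOf c + 1) else w) ++ [c] with hw1
  have hcond : ((w1.length : Int) = K) ↔ (w1.length = k) := by omega
  have hiff : (w1.length = k) ↔
      (k ≤ (pre ++ [c]).length ∧ (pvLastK k (pre ++ [c])).Nodup) := by
    constructor
    · intro h
      have hle : k ≤ (pre ++ [c]).length := h ▸ hs1.length_le
      have hLlen : (pvLastK k (pre ++ [c])).length = k := pv_lastK_len _ _ hle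
      have : pvLastK k (pre ++ [c]) = w1 := by
        have h1 := pv_suffix_total (pv_lastK_suffix k (pre ++ [c])) hs1 (by omega)
        have h2 := pv_suffix_total hs1 (pv_lastK_suffix k (pre ++ [c])) (by omega)
        exact h1.eq_of_length (by omega)
      exact ⟨hle, this ▸ hn1⟩
    · rintro ⟨hle, hnd⟩
      have hLlen : (pvLastK k (pre ++ [c])).length = k := pv_lastK_len _ _ hle
      have := hm1 _ (pv_lastK_suffix k (pre ++ [c])) hnd (by omega)
      have := this.length_le
      omega
  have hval : w1.length = k → w1 = pvLastK k (pre ++ [c]) := by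
    intro h
    have hle : k ≤ (pre ++ [c]).length := h ▸ hs1.length_le
    have hLlen : (pvLastK k (pre ++ [c])).length = k := pv_lastK_len _ _ hle
    have h1 := pv_suffix_total (pv_lastK_suffix k (pre ++ [c])) hs1 (by omega)
    have h2 := pv_suffix_total hs1 (pv_lastK_suffix k (pre ++ [c])) (by omega)
    exact (h1.eq_of_length (by omega)).symm
  constructor
  · show (if ((w1.length : Int) = K) then _ else (s, w1)).1 = _
    by_cases h : w1.length = k
    · rw [if_pos (hcond.mpr h), if_pos (hiff.mp h)]
      show PySem.Set.add s w1 = PySem.Set.add s (pvLastK k (pre ++ [c]))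
      rw [hval h]
    · rw [if_neg (fun hh => h (hcond.mp hh)), if_neg (fun hh => h (hiff.mpr hh))]
  · show pvInv k (pre ++ [c]) (if ((w1.length : Int) = K) then (PySem.Set.add s w1, w1.drop 1) else (s, w1)).2
    by_cases h : w1.length = k
    · rw [if_pos (hcond.mpr h)]
      show pvInv k (pre ++ [c]) (w1.drop 1)
      refine ⟨(List.drop_suffix _ _).trans hs1, (List.drop_sublist _ _).nodup hn1, by simp; omega, ?_⟩
      intro u hu hund hulen
      have := (hm1 u hu hund (by omega)).length_le
      simp only [List.length_drop]
      omega
    · rw [if_neg (fun hh => h (hcond.mp hh))]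
      show pvInv k (pre ++ [c]) w1
      refine ⟨hs1, hn1, by omega, ?_⟩
      intro u hu hund hulen
      exact (hm1 u hu hund (by omega)).length_le

def pvEmit (k : ℕ) : List Char → List Char → List (List Char)
  | _, [] => []
  | pre, c :: rest =>
      (if k ≤ (pre ++ [c]).length ∧ (pvLastK k (pre ++ [c])).Nodup
        then [pvLastK k (pre ++ [c])] else []) ++ pvEmit k (pre ++ [c]) rest

theorem pv_foldA (K : Int) (k : ℕ) (hk : (k : Int) = K) (hk1 : 1 ≤ k)
    (rest : List Char) : ∀ (pre w : List Char) (s : PySem.Set (List Char)), pvInv k pre w →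
      (rest.foldl (pvStepA K) (s, w)).1 = (pvEmit k pre rest).foldl PySem.Set.add s := by
  induction rest with
  | nil => intro pre w s _; simp [pvEmit]
  | cons c rest ih =>
    intro pre w s hInv
    obtain ⟨hfst, hinv2⟩ := pv_step K k hk hk1 pre w c hInv s
    simp only [List.foldl_cons]
    rw [show pvStepA K (s, w) c = ((pvStepA K (s, w) c).1, (pvStepA K (s, w) c).2) from rfl]
    rw [ih (pre ++ [c]) _ _ hinv2, hfst]
    show _ = (pvEmit k pre (c :: rest)).foldl PySem.Set.add s
    rw [pvEmit]
    by_cases h : k ≤ (pre ++ [c]).length ∧ (pvLastK k (pre ++ [c])).Nodup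
    · rw [if_pos h, if_pos h]; simp
    · rw [if_neg h, if_neg h]; simp

theorem pv_noemit (K : Int) (hK : K ≤ 0) (rest : List Char) :
    ∀ (w : List Char) (s : PySem.Set (List Char)),
      (rest.foldl (pvStepA K) (s, w)).1 = s := by
  induction rest with
  | nil => intro w s; rfl
  | cons c rest ih =>
    intro w s
    simp only [List.foldl_cons]
    show (rest.foldl (pvStepA K) (pvStepA K (s, w) c)).1 = s
    rw [show pvStepA K (s, w) c = (s, (if w.contains c then w.drop (w.idxOf c + 1) else w) ++ [c]) from by
      simp [pvStepA]
      intro hx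
      exact absurd hx (by omega)]
    exact ih _ s

def pvRef (k : ℕ) (l : List Char) : List (List Char) :=
  (List.range (l.length - k + 1)).filterMap
    (fun i => if ((l.drop i).take k).Nodup then some ((l.drop i).take k) else none)

theorem pv_emit_gen (k : ℕ) (rest : List Char) : ∀ pre : List Char,
    pvEmit k pre rest = (List.range rest.length).filterMap (fun j =>
      if k ≤ (pre ++ rest.take (j+1)).length ∧ (pvLastK k (pre ++ rest.take (j+1))).Nodup
        then some (pvLastK k (pre ++ rest.take (j+1))) else none) := by
  induction rest with
  | nil => intro pre; simp [pvEmit]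
  | cons c rest ih =>
    intro pre
    rw [pvEmit, ih (pre ++ [c])]
    simp only [List.length_cons, List.range_succ_eq_map, List.filterMap_cons, List.filterMap_map,
      Nat.succ_eq_add_one, Function.comp_def, List.take_succ_cons, List.take_zero,
      List.append_assoc, List.singleton_append]
    by_cases h : k ≤ (pre ++ [c]).length ∧ (pvLastK k (pre ++ [c])).Nodup
    · rw [if_pos h, if_pos h]
      rfl
    · rw [if_neg h, if_neg h]
      rfl


theorem pv_emit_eq_ref (k : ℕ) (hk1 : 1 ≤ k) (l : List Char) (hn : k ≤ l.length) :
    pvEmit k [] l = pvRef k l := by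
  rw [pv_emit_gen]
  simp only [List.nil_append]
  rw [show List.range l.length = List.range ((k-1) + (l.length - k + 1)) from by
    congr 1; omega]
  rw [List.range_add, List.filterMap_append, List.filterMap_map]
  have h1 : List.filterMap (fun j =>
      if k ≤ (List.take (j+1) l).length ∧ (pvLastK k (List.take (j+1) l)).Nodup
        then some (pvLastK k (List.take (j+1) l)) else none) (List.range (k-1)) = [] := by
    rw [List.filterMap_eq_nil_iff]
    intro j hj
    rw [List.mem_range] at hj
    rw [if_neg]
    rintro ⟨hle, -⟩
    have : (List.take (j+1) l).length ≤ j + 1 := by simp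
    omega
  rw [h1, List.nil_append, pvRef]
  apply List.filterMap_congr
  intro i hi
  rw [List.mem_range] at hi
  simp only [Function.comp_apply]
  have hki : k - 1 + i + 1 = k + i := by omega
  rw [hki]
  have hlen : (List.take (k+i) l).length = k + i := by simp; omega
  have hlk : pvLastK k (List.take (k+i) l) = (l.drop i).take k := by
    rw [pvLastK, hlen]
    rw [show k + i - k = i from by omega]
    rw [List.drop_take]
    congr 1
    omega
  rw [hlk]
  by_cases hnd : ((l.drop i).take k).Nodup
  · rw [if_pos ⟨by rw [hlen]; omega, hnd⟩, if_pos hnd]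
  · rw [if_neg (fun hand => hnd hand.2), if_neg hnd]


theorem pv_ofList_len (xs : List Char) :
    (PySem.Set.ofList xs).length = xs.length ↔ xs.Nodup := by
  induction xs using List.reverseRecOn with
  | nil => simp [PySem.Set.ofList]
  | append_singleton xs x ih =>
    rw [PySem.Set.ofList_append_singleton, PySem.Set.add_eq_ite]
    have hle := PySem.Set.length_ofList_le xs
    by_cases hx : x ∈ PySem.Set.ofList xs
    · rw [if_pos hx, PySem.Set.mem_ofList] at *
      apply iff_of_false
      · simp; omega
      · intro h
        rw [List.nodup_append] at h
        exact h.2.2 x hx x (by simp) rfl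
    · rw [if_neg hx]
      rw [PySem.Set.mem_ofList] at hx
      rw [List.nodup_append]
      simp only [List.length_append, List.length_cons, List.length_nil]
      constructor
      · intro h
        refine ⟨ih.mp (by omega), List.nodup_singleton x, fun a ha b hb hab => hx ?_⟩
        rw [List.mem_singleton] at hb
        rw [← hb, ← hab]
        exact ha
      · rintro ⟨h1, -, -⟩
        rw [ih.mpr h1]

theorem pv_fold_filterMap (P : ℕ → Prop) [DecidablePred P] (f : ℕ → List Char) :
    ∀ (xs : List ℕ) (s : PySem.Set (List Char)),
      xs.foldl (fun s i => if P i then PySem.Set.add s (f i) else s) s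
        = (xs.filterMap (fun i => if P i then some (f i) else none)).foldl PySem.Set.add s := by
  intro xs
  induction xs with
  | nil => intro s; rfl
  | cons x xs ih =>
    intro s
    simp only [List.foldl_cons, List.filterMap_cons]
    by_cases h : P x
    · rw [if_pos h, if_pos h]; simp [ih]
    · rw [if_neg h, if_neg h]; simp [ih]

theorem pv_foldB (K : Int) (k : ℕ) (hk : (k : Int) = K)
    (l : List Char) (hn : k ≤ l.length) :
    ((PySem.List.pyRange 0 ((l.length : Int) - K + 1) 1).foldl
      (fun (found : PySem.Set (List Char)) i =>
        let sub := PySem.List.slice l (some i) (some (i + K))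
        if ((PySem.Set.ofList sub).length : Int) = K then PySem.Set.add found sub
        else found)
      PySem.Set.empty) = (pvRef k l).foldl PySem.Set.add PySem.Set.empty := by
  have hNK : (l.length : Int) - K + 1 = ((l.length - k + 1 : ℕ) : Int) := by
    push_cast; omega
  rw [hNK, PySem.List.pyRange_zero_natCast, List.foldl_map]
  rw [PySem.List.foldl_congr_mem _ _
    (fun (found : PySem.Set (List Char)) (j : ℕ) =>
      if ((l.drop j).take k).Nodup then PySem.Set.add found ((l.drop j).take k) else found) _ ?_]
  · rw [pv_fold_filterMap]
    rfl
  · intro acc j hj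
    rw [List.mem_range] at hj
    have hsl : PySem.List.slice l (some (j : Int)) (some ((j : Int) + K)) = (l.drop j).take k := by
      rw [← hk, PySem.List.slice_natCast_add]
    simp only [hsl]
    have hlen : ((l.drop j).take k).length = k := by simp; omega
    by_cases hnd : ((l.drop j).take k).Nodup
    · rw [if_pos, if_pos hnd]
      rw [PySem.Set.ofList_eq_self_of_nodup _ hnd, hlen, hk]
    · rw [if_neg, if_neg hnd]
      have := (pv_ofList_len ((l.drop j).take k)).not
      have hlt : (PySem.Set.ofList ((l.drop j).take k)).length ≠ ((l.drop j).take k).length := by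
        intro h; exact hnd ((pv_ofList_len _).mp h)
      have hle := PySem.Set.length_ofList_le ((l.drop j).take k)
      intro h
      rw [hlen] at hlt hle
      omega
theorem pv_main (stringIn : String) (K : Int) :
    KSubstring stringIn K = KSubstring_alt stringIn K := by
  simp only [KSubstring, KSubstring_alt, PySem.Str.len_eq]
  by_cases hK : K ≤ 0
  · rw [if_neg (by omega), if_pos (Or.inl hK)]
    rw [pv_noemit K hK stringIn.toList [] PySem.Set.empty]
    rfl
  · by_cases hlen : ((stringIn.toList.length : Int) < K)
    · rw [if_pos hlen, if_pos (Or.inr hlen)]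
    · rw [if_neg hlen, if_neg (fun h => h.elim hK hlen)]
      have hk : ((K.toNat : Int)) = K := Int.toNat_of_nonneg (by omega)
      have hk1 : 1 ≤ K.toNat := by omega
      have hn : K.toNat ≤ stringIn.toList.length := by omega
      have hInv0 : pvInv K.toNat [] [] :=
        ⟨List.nil_suffix, List.nodup_nil, by simp; omega,
          fun u hu _ _ => by rw [List.suffix_nil.mp hu]⟩
      rw [pv_foldA K K.toNat hk hk1 stringIn.toList [] [] PySem.Set.empty hInv0]
      rw [pv_emit_eq_ref K.toNat hk1 stringIn.toList hn]
      rw [pv_foldB K K.toNat hk stringIn.toList hn]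

-- ===== VERDICT (by name: the statement is the Claim_ definition above) =====
theorem KSubstring_spec : Claim_equal_KSubstring := by
  intro stringIn K _
  show KSubstring stringIn K = KSubstring_alt stringIn K
  exact pv_main stringIn K
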